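-- pv_equiv track=rewrite | github.com/gpiat/KnowBert_UMLS | misc_code/evaluate_umls_cand_gen_performance.py | candidate_set_to_dict
-- ===== SOURCE A (Python) =====
-- from collections import OrderedDict
--
-- def candidate_set_to_dict(candidate_set):
--     candidate_dict = OrderedDict()
--     for beg, end, _, cui in sorted(candidate_set):
--         if (beg, end) in candidate_dict.keys():
--             candidate_dict[(beg, end)].append(cui)
--         else:
--             candidate_dict[(beg, end)] = [cui]
--     for k in candidate_dict:
--         candidate_dict[k].sort()
--     return candidate_dict
-- ===== SOURCE B (Python) =====
-- from collections import OrderedDict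
--
-- def candidate_set_to_dict(candidate_set):
--     # No grouping dict at all: collect the distinct spans, then for each span
--     # in sorted order rescan the input and collect its cuis, sorted.
--     spans = sorted({(beg, end) for beg, end, _, _ in candidate_set})
--     return OrderedDict(
--         (span, sorted(cui for beg, end, _, cui in candidate_set
--                       if (beg, end) == span))
--         for span in spans)
-- ===== Notes on version B (the rewrite author's own statement) =====
-- stated objective: alternative
-- what changed: B drops the grouping dict entirely: it computes the distinct (beg, end) spans with a set comprehension, sorts them, and for each span rescans the input with a filtering generator to collect and sort that span's cuis, instead of A's sort-all-tuples pass that incrementally builds an OrderedDict with a membership test and if/else append.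
import Mathlib
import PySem

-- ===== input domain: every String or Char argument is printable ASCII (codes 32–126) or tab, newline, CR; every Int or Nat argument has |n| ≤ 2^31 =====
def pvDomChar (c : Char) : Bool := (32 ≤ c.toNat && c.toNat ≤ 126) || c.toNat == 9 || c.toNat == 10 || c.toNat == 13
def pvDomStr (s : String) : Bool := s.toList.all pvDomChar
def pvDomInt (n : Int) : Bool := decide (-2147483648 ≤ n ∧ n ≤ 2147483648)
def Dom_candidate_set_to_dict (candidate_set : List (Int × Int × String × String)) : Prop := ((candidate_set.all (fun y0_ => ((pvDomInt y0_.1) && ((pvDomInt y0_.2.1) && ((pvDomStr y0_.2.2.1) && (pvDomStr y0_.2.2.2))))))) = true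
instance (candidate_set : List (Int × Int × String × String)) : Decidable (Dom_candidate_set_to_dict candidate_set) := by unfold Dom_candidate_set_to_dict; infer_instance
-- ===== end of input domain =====

-- B drops the grouping dict entirely: distinct spans via a set, then a per-span rescan of the input
-- collecting and sorting that span's cuis — instead of A's sort-everything pass building an
-- OrderedDict incrementally; objective: alternative (same asymptotics up to the number of spans).
-- Equivalence is about the RETURN value (A mutates no argument).


-- ===== PORT A =====
-- Python's `<` on a 4-tuple (int, int, str, str): elementwise == / <, lexicographic (exact).
def pvTupLT (a b : Int × Int × String × String) : Bool :=
  decide (a.1 < b.1) ||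
    (a.1 == b.1 && (decide (a.2.1 < b.2.1) ||
      (a.2.1 == b.2.1 && (decide (a.2.2.1 < b.2.2.1) ||
        (a.2.2.1 == b.2.2.1 && decide (a.2.2.2 < b.2.2.2))))))

-- `sorted(candidate_set)`: the same stable insertBy fold PySem.List.sorted is made of
-- (PySem.List.sorted_eq_foldl_insertBy), with the tuple comparison pvTupLT written out (exact).
def pvSortedCand (cs : List (Int × Int × String × String)) : List (Int × Int × String × String) :=
  cs.foldl (fun acc x => PySem.List.insertBy pvTupLT x acc) []

-- A's first loop: build the OrderedDict, membership test then append / fresh singleton.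
def pvDictA (cs : List (Int × Int × String × String)) : PySem.Dict (Int × Int) (List String) :=
  (pvSortedCand cs).foldl
    (fun d t =>
      if d.contains (t.1, t.2.1) then
        d.modify (t.1, t.2.1) [] (fun l => l ++ [t.2.2.2])
      else
        d.insert (t.1, t.2.1) [t.2.2.2])
    PySem.Dict.empty

-- A's second loop sorts each value list in place; the returned dict as an association list (flattened triples).
def candidate_set_to_dict (candidate_set : List (Int × Int × String × String)) : List (Int × Int × List String) :=
  (pvDictA candidate_set).items.map (fun p => (p.1.1, p.1.2, PySem.List.sorted p.2 (fun s => s) false))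

-- ===== PORT B =====
-- spans = sorted({(beg, end) for beg, end, _, _ in candidate_set}); Python's tuple `<` on
-- (Int, Int) is lexicographic, rendered as sorted2 with the two components as keys (exact).
def pvSpans (cs : List (Int × Int × String × String)) : List (Int × Int) :=
  PySem.List.sorted2 (PySem.Set.ofList (cs.map (fun t => (t.1, t.2.1))))
    (fun k => k.1) (fun k => k.2) false

-- OrderedDict((span, sorted(cui for beg, end, _, cui in candidate_set if (beg, end) == span)) for span in spans)
def candidate_set_to_dict_alt (candidate_set : List (Int × Int × String × String)) : List (Int × Int × List String) :=
  (pvSpans candidate_set).map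
    (fun k => (k.1, k.2,
      PySem.List.sorted
        ((candidate_set.filter (fun t => (t.1, t.2.1) == k)).map (fun t => t.2.2.2))
        (fun s => s) false))

-- ===== PRECONDITION & SPEC =====
def Spec_candidate_set_to_dict (candidate_set : List (Int × Int × String × String)) (out : List (Int × Int × List String)) : Prop := out = candidate_set_to_dict_alt candidate_set
instance (candidate_set : List (Int × Int × String × String)) (out : List (Int × Int × List String)) : Decidable (Spec_candidate_set_to_dict candidate_set out) := by unfold Spec_candidate_set_to_dict; infer_instance

-- ===== CLAIM (what is proved, stated in full; the proofs are below) =====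
def Claim_equal_candidate_set_to_dict : Prop := ∀ (candidate_set : List (Int × Int × String × String)), Dom_candidate_set_to_dict candidate_set → Spec_candidate_set_to_dict candidate_set (candidate_set_to_dict candidate_set)

-- ===== LEMMAS AND PROOFS =====

-- proof-only helpers
def pvEnc4 (t : Int × Int × String × String) : Lex (Int × Lex (Int × Lex (String × String))) :=
  toLex (t.1, toLex (t.2.1, toLex (t.2.2.1, t.2.2.2)))
def pvEncK (k : Int × Int) : Lex (Int × Int) := toLex k
def pvKey (t : Int × Int × String × String) : Int × Int := (t.1, t.2.1)
def pvCui (t : Int × Int × String × String) : String := t.2.2.2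
-- the grouping fold A's first loop amounts to once the if/else is folded into modify
def pvGroups (cs : List (Int × Int × String × String)) : PySem.Dict (Int × Int) (List String) :=
  cs.foldl (fun d t => d.modify (t.1, t.2.1) [] (fun l => l ++ [t.2.2.2])) PySem.Dict.empty

lemma pvEncK_injective : Function.Injective pvEncK := by
  intro a b h
  simpa [pvEncK] using congrArg ofLex h

lemma pvTupLT_eq (a b : Int × Int × String × String) :
    pvTupLT a b = decide (pvEnc4 a < pvEnc4 b) := by
  rw [Bool.eq_iff_iff]
  simp [pvTupLT, pvEnc4, Prod.Lex.lt_iff]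

lemma pvSortedCand_eq (cs : List (Int × Int × String × String)) :
    pvSortedCand cs = PySem.List.sorted cs pvEnc4 false := by
  unfold pvSortedCand
  show List.foldl (fun acc x => PySem.List.insertBy pvTupLT x acc) [] cs
      = List.foldl (fun acc x => PySem.List.insertBy (fun a b => decide (pvEnc4 a < pvEnc4 b)) x acc) [] cs
  congr 1
  funext acc x
  congr 1
  funext a b
  exact pvTupLT_eq a b

lemma pvSorted2_eq (xs : List (Int × Int)) :
    PySem.List.sorted2 xs (fun k => k.1) (fun k => k.2) false
      = PySem.List.sorted xs pvEncK false := by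
  show List.foldl (fun acc x => PySem.List.insertBy
        (fun a b : Int × Int => decide (a.1 < b.1) || (!decide (b.1 < a.1) && decide (a.2 < b.2))) x acc) [] xs
      = List.foldl (fun acc x => PySem.List.insertBy (fun a b => decide (pvEncK a < pvEncK b)) x acc) [] xs
  congr 1
  funext acc x
  congr 1
  funext a b
  rw [Bool.eq_iff_iff]
  simp only [pvEncK, Prod.Lex.lt_iff, ofLex_toLex, Bool.or_eq_true, Bool.and_eq_true,
    Bool.not_eq_true', decide_eq_true_eq, decide_eq_false_iff_not]
  omega

-- A's if/else step is the modify step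
lemma pvStep_eq (d : PySem.Dict (Int × Int) (List String)) (t : Int × Int × String × String) :
    (if d.contains (t.1, t.2.1) then
        d.modify (t.1, t.2.1) [] (fun l => l ++ [t.2.2.2])
      else
        d.insert (t.1, t.2.1) [t.2.2.2])
      = d.modify (t.1, t.2.1) [] (fun l => l ++ [t.2.2.2]) := by
  by_cases h : d.contains (t.1, t.2.1)
  · simp [h]
  · have h' : d.contains (t.1, t.2.1) = false := by simpa using h
    have hg : d.get? (t.1, t.2.1) = none := (PySem.Dict.get?_eq_none_iff_contains d _).mpr h'
    simp [h', PySem.Dict.modify, PySem.Dict.getD, hg]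

lemma pvDictA_eq (cs : List (Int × Int × String × String)) :
    pvDictA cs = pvGroups (pvSortedCand cs) := by
  unfold pvDictA pvGroups
  congr 1
  funext d t
  exact pvStep_eq d t

-- characterisation of the grouping fold
lemma pvGroups_keys (l : List (Int × Int × String × String)) :
    (pvGroups l).keys = PySem.Set.ofList (l.map pvKey) := by
  unfold pvGroups
  rw [PySem.Dict.keys_foldl_modify_key l (fun t => (t.1, t.2.1)) [] (fun _ t => (fun v => v ++ [t.2.2.2])) PySem.Dict.empty]
  rfl

lemma pvGroups_nodup (l : List (Int × Int × String × String)) :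
    (pvGroups l).keys.Nodup := by
  unfold pvGroups
  exact PySem.Dict.nodup_keys_foldl_modify_key l (fun t => (t.1, t.2.1)) [] (fun _ t => (fun v => v ++ [t.2.2.2])) PySem.Dict.empty (by simp [PySem.Dict.empty, PySem.Dict.keys])

lemma pvGroups_getD (l : List (Int × Int × String × String)) (k : Int × Int) :
    (pvGroups l).getD k [] = (l.filter (fun t => pvKey t == k)).map pvCui := by
  unfold pvGroups
  have h : l.foldl (fun d t => d.modify (t.1, t.2.1) [] (fun v => v ++ [t.2.2.2])) PySem.Dict.empty
      = (l.map (fun t => ((t.1, t.2.1), t.2.2.2))).foldl (fun d p => d.modify p.1 [] (fun v => v ++ [p.2])) PySem.Dict.empty := by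
    rw [List.foldl_map]
  rw [h, PySem.Dict.getD_foldl_modify_append]
  simp [List.filter_map, Function.comp_def, pvKey, pvCui, PySem.Dict.getD, PySem.Dict.get?, PySem.Dict.empty]

lemma pvOfList_sublist {α : Type} [BEq α] [LawfulBEq α] (l : List α) : (PySem.Set.ofList l).Sublist l := by
  induction l with
  | nil => simp [PySem.Set.ofList_nil]
  | cons x xs ih =>
      rw [PySem.Set.ofList_cons]
      refine List.Sublist.cons₂ x (List.Sublist.trans ?_ ih)
      simpa [PySem.Set.discard] using List.filter_sublist (PySem.Set.ofList xs)

lemma pvEnc4_mono {a b : Int × Int × String × String}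
    (h : pvEnc4 a ≤ pvEnc4 b) : pvEncK (pvKey a) ≤ pvEncK (pvKey b) := by
  simp only [pvEnc4, pvEncK, pvKey, Prod.Lex.le_iff, ofLex_toLex] at h ⊢
  rcases h with h | ⟨h1, h | ⟨h2, _⟩⟩
  · exact Or.inl h
  · exact Or.inr ⟨h1, le_of_lt h⟩
  · exact Or.inr ⟨h1, le_of_eq h2⟩

-- the key list A produces (first occurrences of the fully sorted list) IS B's sorted span set
lemma pvKeys_eq (cs : List (Int × Int × String × String)) :
    PySem.Set.ofList ((pvSortedCand cs).map pvKey)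
      = PySem.List.sorted (PySem.Set.ofList (cs.map pvKey)) pvEncK false := by
  have hperm1 : (pvSortedCand cs).Perm cs := by
    rw [pvSortedCand_eq]; exact PySem.List.sorted_perm cs pvEnc4 false
  have hpw : List.Pairwise (fun a b => pvEncK a ≤ pvEncK b)
      (PySem.Set.ofList ((pvSortedCand cs).map pvKey)) := by
    have h1 : List.Pairwise (fun a b => pvEnc4 a ≤ pvEnc4 b) (pvSortedCand cs) := by
      rw [pvSortedCand_eq]; exact PySem.List.sorted_pairwise cs pvEnc4
    have h2 : List.Pairwise (fun a b => pvEncK a ≤ pvEncK b) ((pvSortedCand cs).map pvKey) := by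
      rw [List.pairwise_map]
      exact h1.imp (fun h => pvEnc4_mono h)
    exact h2.sublist (pvOfList_sublist _)
  have hpw2 : List.Pairwise (fun a b => pvEncK a ≤ pvEncK b)
      (PySem.List.sorted (PySem.Set.ofList (cs.map pvKey)) pvEncK false) :=
    PySem.List.sorted_pairwise _ pvEncK
  have hperm : (PySem.Set.ofList ((pvSortedCand cs).map pvKey)).Perm
      (PySem.List.sorted (PySem.Set.ofList (cs.map pvKey)) pvEncK false) := by
    have hn1 : (PySem.Set.ofList ((pvSortedCand cs).map pvKey)).Nodup := PySem.Set.nodup_ofList _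
    have hn2 : (PySem.List.sorted (PySem.Set.ofList (cs.map pvKey)) pvEncK false).Nodup :=
      ((PySem.List.sorted_perm _ pvEncK false).nodup_iff).mpr (PySem.Set.nodup_ofList _)
    rw [List.perm_ext_iff_of_nodup hn1 hn2]
    intro a
    rw [PySem.Set.mem_ofList, PySem.List.mem_sorted, PySem.Set.mem_ofList]
    constructor
    · intro ha; exact ((hperm1.map pvKey).mem_iff).mp ha
    · intro ha; exact ((hperm1.map pvKey).mem_iff).mpr ha
  exact PySem.List.eq_of_perm_of_pairwise_le_of_injective pvEncK pvEncK_injective hperm hpw hpw2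

-- per key, both programs sort the same multiset of cuis (A filters the sorted list, B the input)
lemma pvVals_eq (cs : List (Int × Int × String × String)) (k : Int × Int) :
    PySem.List.sorted ((pvGroups (pvSortedCand cs)).getD k []) (fun s => s) false
      = PySem.List.sorted ((cs.filter (fun t => (t.1, t.2.1) == k)).map (fun t => t.2.2.2))
          (fun s => s) false := by
  rw [pvGroups_getD]
  have hperm1 : (pvSortedCand cs).Perm cs := by
    rw [pvSortedCand_eq]; exact PySem.List.sorted_perm cs pvEnc4 false
  have hperm2 : (((pvSortedCand cs).filter (fun t => pvKey t == k)).map pvCui).Perm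
      ((cs.filter (fun t => (t.1, t.2.1) == k)).map (fun t => t.2.2.2)) := by
    have : (fun t : Int × Int × String × String => pvKey t == k)
        = (fun t : Int × Int × String × String => (t.1, t.2.1) == k) := rfl
    rw [this]
    exact (hperm1.filter _).map _
  exact PySem.List.sorted_eq_sorted_of_perm _ _ (fun s => s) (fun a b h => h) hperm2

-- ===== VERDICT (by name: the statement is the Claim_ definition above) =====
theorem candidate_set_to_dict_spec : Claim_equal_candidate_set_to_dict := by
  intro cs _
  unfold Spec_candidate_set_to_dict candidate_set_to_dict candidate_set_to_dict_alt pvSpans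
  rw [pvDictA_eq]
  rw [PySem.Dict.items_eq_map_keys _ (pvGroups_nodup _) []]
  rw [List.map_map]
  rw [pvGroups_keys, pvSorted2_eq]
  have : cs.map (fun t => (t.1, t.2.1)) = cs.map pvKey := rfl
  rw [this, ← pvKeys_eq]
  refine List.map_congr_left (fun k _ => ?_)
  simp only [Function.comp_def]
  rw [pvVals_eq]
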